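-- pv_equiv track=rewrite | github.com/vannguyennd/can | units_start_end.py | compare_target_predict_start
-- ===== SOURCE A (Python) =====
-- def compare_target_predict_start(start_predicts, start_targets):
--     count_true = 0
--     count_false = 0
--     for i in start_predicts:
--         if i in start_targets:
--             count_true += 1
--         else:
--             count_false += 1
--
--     return count_true, count_false
-- ===== SOURCE B (Python) =====
-- def compare_target_predict_start(start_predicts, start_targets):
--     # Sort-and-merge: count hits by a two-pointer sweep over the sorted
--     # predictions and the sorted distinct targets, then derive the misses.
--     preds = sorted(start_predicts)
--     targs = sorted(set(start_targets))
--     i = j = 0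
--     hits = 0
--     while i < len(preds) and j < len(targs):
--         if preds[i] < targs[j]:
--             i += 1
--         elif preds[i] > targs[j]:
--             j += 1
--         else:
--             hits += 1
--             i += 1
--     return hits, len(preds) - hits
-- ===== Notes on version B (the rewrite author's own statement) =====
-- stated objective: alternative
-- what changed: B replaces A's per-prediction linear membership scan with a sort-then-merge set intersection: it sorts the predictions and the distinct targets and counts the hits with a two-pointer sweep, deriving the miss count by subtraction.
import Mathlib
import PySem

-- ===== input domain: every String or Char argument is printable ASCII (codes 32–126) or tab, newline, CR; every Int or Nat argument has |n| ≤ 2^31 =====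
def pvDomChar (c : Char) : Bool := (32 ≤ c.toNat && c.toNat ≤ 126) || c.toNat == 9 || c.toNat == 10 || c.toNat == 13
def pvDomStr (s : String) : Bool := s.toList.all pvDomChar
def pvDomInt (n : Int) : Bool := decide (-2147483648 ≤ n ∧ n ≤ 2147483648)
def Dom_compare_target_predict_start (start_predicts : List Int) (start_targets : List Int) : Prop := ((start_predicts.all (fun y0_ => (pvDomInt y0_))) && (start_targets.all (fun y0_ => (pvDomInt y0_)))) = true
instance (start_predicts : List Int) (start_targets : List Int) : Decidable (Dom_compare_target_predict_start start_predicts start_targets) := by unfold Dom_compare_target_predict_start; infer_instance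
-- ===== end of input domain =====

-- B counts the hits by a two-pointer merge of the sorted predictions with the sorted distinct targets (a different algorithm, asymptotically faster in Python).

-- ===== PORT A =====
-- for i in start_predicts: if i in start_targets: count_true += 1 else count_false += 1
def compare_target_predict_start (start_predicts : List Int) (start_targets : List Int) : Int × Int :=
  let counts := start_predicts.foldl
    (fun (c : Int × Int) i => if start_targets.contains i then (c.1 + 1, c.2) else (c.1, c.2 + 1))
    (0, 0)
  counts

-- ===== PORT B =====
-- the while loop over the two sorted lists: advance the smaller side, count an equal pair as a hit and advance the prediction side
def pvMergeCount : List Int → List Int → Int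
  | [], _ => 0
  | _ :: _, [] => 0
  | a :: as, b :: bs =>
    if a < b then pvMergeCount as (b :: bs)
    else if a > b then pvMergeCount (a :: as) bs
    else 1 + pvMergeCount as (b :: bs)
termination_by as bs => as.length + bs.length

def compare_target_predict_start_alt (start_predicts : List Int) (start_targets : List Int) : Int × Int :=
  let preds := PySem.List.sorted start_predicts (fun x => x) false
  let targs := PySem.List.sorted (PySem.Set.ofList start_targets) (fun x => x) false
  let hits := pvMergeCount preds targs
  (hits, (preds.length : Int) - hits)

-- ===== PRECONDITION & SPEC =====
def Spec_compare_target_predict_start (start_predicts : List Int) (start_targets : List Int) (out : Int × Int) : Prop := out = compare_target_predict_start_alt start_predicts start_targets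
instance (start_predicts : List Int) (start_targets : List Int) (out : Int × Int) : Decidable (Spec_compare_target_predict_start start_predicts start_targets out) := by unfold Spec_compare_target_predict_start; infer_instance

-- ===== CLAIM (what is proved, stated in full; the proofs are below) =====
def Claim_equal_compare_target_predict_start : Prop := ∀ (start_predicts : List Int) (start_targets : List Int), Dom_compare_target_predict_start start_predicts start_targets → Spec_compare_target_predict_start start_predicts start_targets (compare_target_predict_start start_predicts start_targets)

-- ===== LEMMAS AND PROOFS =====

-- the merge over a ≤-sorted left list and a <-sorted right list counts left elements present in the right list
lemma pvMergeCount_eq (as bs : List Int) (ha : as.Pairwise (· ≤ ·)) (hb : bs.Pairwise (· < ·)) :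
    pvMergeCount as bs = (as.countP (fun a => bs.contains a) : Int) := by
  induction as, bs using pvMergeCount.induct with
  | case1 bs => simp [pvMergeCount]
  | case2 a as => simp [pvMergeCount]
  | case3 a as b bs hlt ih =>
    have hnotmem : a ∉ b :: bs := by
      intro hmem
      rcases List.mem_cons.mp hmem with h | h
      · omega
      · have := (List.pairwise_cons.mp hb).1 a h; omega
    have h1 : a ≠ b := fun h => hnotmem (by simp [h])
    have h2 : a ∉ bs := fun h => hnotmem (List.mem_cons_of_mem _ h)
    rw [pvMergeCount, if_pos hlt, ih (List.pairwise_cons.mp ha).2 hb]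
    simp [List.countP_cons, h1, h2]
  | case4 a as b bs hnlt hgt ih =>
    have hle : ∀ x ∈ a :: as, b < x := by
      intro x hx
      rcases List.mem_cons.mp hx with h | h
      · omega
      · have := (List.pairwise_cons.mp ha).1 x h; omega
    rw [pvMergeCount, if_neg hnlt, if_pos hgt, ih ha (List.pairwise_cons.mp hb).2]
    congr 1
    apply List.countP_congr
    intro x hx
    have hne : x ≠ b := by have := hle x hx; omega
    simp [hne]
  | case5 a as b bs hnlt hngt ih =>
    have heq : a = b := by omega
    rw [pvMergeCount, if_neg hnlt, if_neg hngt, ih (List.pairwise_cons.mp ha).2 hb]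
    subst heq
    simp [List.countP_cons]
    push_cast
    ring

-- A's loop invariant: the pair of counters in terms of countP
lemma a_fold_eq (p t : List Int) (ct cf : Int) :
    p.foldl (fun (c : Int × Int) i => if t.contains i then (c.1 + 1, c.2) else (c.1, c.2 + 1)) (ct, cf)
      = (ct + (p.countP (fun a => t.contains a) : Int),
         cf + ((p.length : Int) - (p.countP (fun a => t.contains a) : Int))) := by
  induction p generalizing ct cf with
  | nil => simp
  | cons h tl ih =>
    simp only [List.foldl_cons, List.length_cons, List.countP_cons]
    split_ifs with hc <;>
      · rw [ih]
        refine Prod.ext ?_ ?_ <;> simp [hc] <;> push_cast <;> ring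

-- membership in the sorted distinct targets is membership in the targets
lemma contains_sorted_ofList (t : List Int) (x : Int) :
    (PySem.List.sorted (PySem.Set.ofList t) (fun x => x) false).contains x = t.contains x := by
  by_cases h : x ∈ t <;>
    simp [List.contains_iff_mem, PySem.List.mem_sorted, PySem.Set.mem_ofList, h]

theorem compare_target_predict_start_spec : Claim_equal_compare_target_predict_start := by
  intro p t _
  unfold Spec_compare_target_predict_start compare_target_predict_start compare_target_predict_start_alt
  simp only
  rw [a_fold_eq,
      pvMergeCount_eq _ _ (PySem.List.sorted_pairwise p (fun x => x) : _)
        (PySem.List.sorted_ofList_pairwise_lt t)]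
  have hperm : (PySem.List.sorted p (fun x => x) false).Perm p := PySem.List.sorted_perm p _ _
  have hcount : (PySem.List.sorted p (fun x => x) false).countP
      (fun a => (PySem.List.sorted (PySem.Set.ofList t) (fun x => x) false).contains a)
      = p.countP (fun a => t.contains a) := by
    rw [hperm.countP_eq]
    apply List.countP_congr
    intro x _
    simp [contains_sorted_ofList]
  rw [hcount, hperm.length_eq]
  simp
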